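-- pv_equiv track=rewrite | github.com/mars887/avi-boost-rework | utils/param_utils.py | strip_param_tokens
-- ===== SOURCE A (Python) =====
-- from typing import List, Optional, Tuple
--
-- def is_param_key(token: str) -> bool:
--     return str(token or "").strip().startswith("--")
--
-- def strip_param_tokens(tokens: List[str], keys: List[str]) -> List[str]:
--     keys_set = {str(key) for key in keys}
--     out: List[str] = []
--     index = 0
--     while index < len(tokens):
--         token = tokens[index]
--         if token in keys_set:
--             has_value = index + 1 < len(tokens) and not is_param_key(tokens[index + 1])
--             index += 2 if has_value else 1
--             continue
--         out.append(token)
--         index += 1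
--     return out
-- ===== SOURCE B (Python) =====
-- from typing import List
--
--
-- def is_param_key(token: str) -> bool:
--     return str(token or "").strip().startswith("--")
--
--
-- def strip_param_tokens(tokens: List[str], keys: List[str]) -> List[str]:
--     keys_set = {str(key) for key in keys}
--     drop = set()
--     for i, token in enumerate(tokens):
--         if i in drop:
--             continue
--         if token in keys_set:
--             drop.add(i)
--             if i + 1 < len(tokens) and not is_param_key(tokens[i + 1]):
--                 drop.add(i + 1)
--     return [token for i, token in enumerate(tokens) if i not in drop]
-- ===== Notes on version B (the rewrite author's own statement) =====
-- stated objective: alternative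
-- what changed: Replaced A's single index-jumping while loop (skipping a key and its consumed value by advancing the index by 2) with a two-pass decomposition: a first pass over enumerate(tokens) builds the set of indices to drop, and a second pass filters the enumerated list against that set.
import Mathlib
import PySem

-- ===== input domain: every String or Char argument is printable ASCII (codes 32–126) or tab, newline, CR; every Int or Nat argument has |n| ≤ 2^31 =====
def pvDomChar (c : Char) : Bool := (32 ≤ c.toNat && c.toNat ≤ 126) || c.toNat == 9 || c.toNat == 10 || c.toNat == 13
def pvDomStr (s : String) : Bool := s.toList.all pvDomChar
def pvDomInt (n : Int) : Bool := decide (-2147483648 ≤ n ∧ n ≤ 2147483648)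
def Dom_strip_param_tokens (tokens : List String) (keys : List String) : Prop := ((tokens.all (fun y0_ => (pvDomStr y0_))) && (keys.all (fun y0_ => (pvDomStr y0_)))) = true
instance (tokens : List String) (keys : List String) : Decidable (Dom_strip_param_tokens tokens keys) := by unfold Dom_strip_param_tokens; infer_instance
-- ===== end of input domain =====

-- B replaces A's index-jumping while loop by two passes: a fold marking the set of dropped
-- indices, then a filter of the enumerated token list (objective: alternative decomposition).

-- ===== PORT A =====
-- is_param_key(token): `token or ""` on a str is token itself unless empty
def pvIsParamKey (token : String) : Bool :=
  PySem.Str.startswith (PySem.Str.strip (if token == "" then "" else token)) "--"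

def stripA_go (tokens : List String) (keys_set : PySem.Set String) (out : List String) (index : Nat) : List String :=
  if h : index < tokens.length then
    let token := tokens[index]
    if PySem.Set.contains keys_set token then
      let has_value := decide (index + 1 < tokens.length) && !pvIsParamKey (tokens.getD (index + 1) "")
      stripA_go tokens keys_set out (if has_value then index + 2 else index + 1)
    else
      stripA_go tokens keys_set (out ++ [token]) (index + 1)
  else out
termination_by tokens.length - index
decreasing_by all_goals first | (split <;> omega) | omega

def strip_param_tokens (tokens : List String) (keys : List String) : List String :=
  stripA_go tokens (PySem.Set.ofList keys) [] 0

-- ===== PORT B =====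
def stripB_step (tokens : List String) (keys_set : PySem.Set String) (drop : PySem.Set Int) (p : Int × String) : PySem.Set Int :=
  if PySem.Set.contains drop p.1 then drop
  else if PySem.Set.contains keys_set p.2 then
    let drop := PySem.Set.add drop p.1
    if decide (p.1 + 1 < (tokens.length : Int)) && !pvIsParamKey (PySem.List.pyGetD tokens (p.1 + 1) "") then
      PySem.Set.add drop (p.1 + 1)
    else drop
  else drop

def strip_param_tokens_alt (tokens : List String) (keys : List String) : List String :=
  let keys_set := PySem.Set.ofList keys
  let drop := (PySem.List.enumerate tokens).foldl (stripB_step tokens keys_set) PySem.Set.empty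
  (PySem.List.enumerate tokens).filterMap
    (fun p => if PySem.Set.contains drop p.1 then none else some p.2)

-- ===== PRECONDITION & SPEC =====
def Spec_strip_param_tokens (tokens : List String) (keys : List String) (out : List String) : Prop := out = strip_param_tokens_alt tokens keys
instance (tokens : List String) (keys : List String) (out : List String) : Decidable (Spec_strip_param_tokens tokens keys out) := by unfold Spec_strip_param_tokens; infer_instance

-- ===== CLAIM (what is proved, stated in full; the proofs are below) =====
def Claim_equal_strip_param_tokens : Prop := ∀ (tokens : List String) (keys : List String), Dom_strip_param_tokens tokens keys → Spec_strip_param_tokens tokens keys (strip_param_tokens tokens keys)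

-- ===== LEMMAS AND PROOFS =====

-- "the next token exists and is not a param key" for a suffix of the token list
def pvHasVal : List String → Bool
  | [] => false
  | u :: _ => !pvIsParamKey u

-- the indices B's first pass marks, scanning from index i with b = "index i already marked"
def markGo (ks : PySem.Set String) : Int → Bool → List String → List Int
  | _, _, [] => []
  | i, b, t :: rest =>
    if b then markGo ks (i + 1) false rest
    else if PySem.Set.contains ks t then
      if pvHasVal rest then i :: (i + 1) :: markGo ks (i + 1) true rest
      else i :: markGo ks (i + 1) false rest
    else markGo ks (i + 1) false rest

-- the common specification: the result as structural recursion on the token list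
def specGo (ks : PySem.Set String) : List String → List String
  | [] => []
  | t :: rest =>
    if PySem.Set.contains ks t then
      if pvHasVal rest then specGo ks rest.tail else specGo ks rest
    else t :: specGo ks rest
termination_by l => l.length
decreasing_by all_goals simp [List.length_tail]

theorem markGo_ge (ks : PySem.Set String) (l : List String) :
    ∀ (i : Int) (b : Bool), ∀ j ∈ markGo ks i b l, i ≤ j := by
  induction l with
  | nil => intro i b j hj; simp [markGo] at hj
  | cons t rest ih =>
    intro i b j hj
    rw [markGo] at hj
    split_ifs at hj with h1 h2 h3
    · have := ih (i + 1) false j hj; omega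
    · simp only [List.mem_cons] at hj
      rcases hj with h | h | h
      · omega
      · omega
      · have := ih (i + 1) true j h; omega
    · simp only [List.mem_cons] at hj
      rcases hj with h | h
      · omega
      · have := ih (i + 1) false j h; omega
    · have := ih (i + 1) false j hj; omega

theorem hasVal_eq (tokens : List String) (m : Nat) :
    (decide (m < tokens.length) && !pvIsParamKey (tokens.getD m "")) = pvHasVal (tokens.drop m) := by
  by_cases h : m < tokens.length
  · rw [List.drop_eq_getElem_cons h]
    simp [pvHasVal, h, List.getD]
  · have : tokens.drop m = [] := List.drop_eq_nil_of_le (by omega)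
    simp [this, pvHasVal, h]

theorem stripA_go_aux (ks : PySem.Set String) (tokens : List String) :
    ∀ (n index : Nat) (out : List String), tokens.length - index ≤ n →
      stripA_go tokens ks out index = out ++ specGo ks (tokens.drop index) := by
  intro n
  induction n with
  | zero =>
    intro index out h
    have hge : tokens.length ≤ index := by omega
    rw [stripA_go]
    simp [Nat.not_lt.mpr hge, List.drop_eq_nil_of_le hge, specGo]
  | succ n ih =>
    intro index out h
    rw [stripA_go]
    by_cases hlt : index < tokens.length
    · rw [dif_pos hlt]
      rw [List.drop_eq_getElem_cons hlt, specGo]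
      by_cases hk : PySem.Set.contains ks tokens[index] = true
      · rw [if_pos hk, if_pos hk]
        simp only [hasVal_eq tokens (index + 1)]
        by_cases hv : pvHasVal (tokens.drop (index + 1)) = true
        · rw [if_pos hv, if_pos hv, ih (index + 2) out (by omega)]
          rw [← List.tail_drop]
        · rw [if_neg hv, if_neg hv, ih (index + 1) out (by omega)]
      · rw [if_neg hk, if_neg hk, ih (index + 1) (out ++ [tokens[index]]) (by omega)]
        simp
    · rw [dif_neg hlt]
      have hge : tokens.length ≤ index := by omega
      simp [List.drop_eq_nil_of_le hge, specGo]

theorem stripB_cond (pre : List String) (t : String) (rest : List String) :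
    (decide ((pre.length : Int) + 1 < ((pre ++ t :: rest).length : Int)) &&
      !pvIsParamKey (PySem.List.pyGetD (pre ++ t :: rest) ((pre.length : Int) + 1) "")) = pvHasVal rest := by
  have hcast : (pre.length : Int) + 1 = ((pre.length + 1 : Nat) : Int) := by push_cast; ring
  rw [hcast, PySem.List.pyGetD_natCast]
  cases rest with
  | nil => simp [pvHasVal]
  | cons u rest' =>
    have hget : (pre ++ t :: u :: rest').getD (pre.length + 1) "" = u := by
      simp [List.getD]
    rw [hget]
    have hlt : ((pre.length + 1 : Nat) : Int) < ((pre ++ t :: u :: rest').length : Int) := by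
      simp [List.length_append]
    simp [pvHasVal]

theorem contains_false_of_le (d : List Int) (i j : Int) (h1 : ∀ x ∈ d, x ≤ i) (hij : i < j) :
    PySem.Set.contains d j = false := by
  rw [Bool.eq_false_iff]
  intro hc
  have := h1 j ((PySem.Set.contains_iff _ _).mp hc)
  omega

theorem foldB_eq_markGo (ks : PySem.Set String) :
    ∀ (suf pre : List String) (d : List Int),
      (∀ j ∈ d, j ≤ (pre.length : Int)) →
      (PySem.List.enumerate suf (pre.length : Int)).foldl (stripB_step (pre ++ suf) ks) d
        = d ++ markGo ks (pre.length : Int) (PySem.Set.contains d (pre.length : Int)) suf := by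
  intro suf
  induction suf with
  | nil => intro pre d h1; simp [PySem.List.enumerate, markGo]
  | cons t rest ih =>
    intro pre d h1
    have hlen : ((pre ++ [t]).length : Int) = (pre.length : Int) + 1 := by simp
    have hre : (pre ++ [t]) ++ rest = pre ++ t :: rest := by simp
    rw [PySem.List.enumerate_cons, List.foldl_cons, markGo]
    by_cases hb : PySem.Set.contains d (pre.length : Int) = true
    · rw [if_pos hb]
      have hstep : stripB_step (pre ++ t :: rest) ks d ((pre.length : Int), t) = d := by
        simp only [stripB_step, hb, if_true]
      rw [hstep]
      have := ih (pre ++ [t]) d (by intro j hj; have := h1 j hj; omega)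
      rw [hre, hlen] at this
      rw [this, contains_false_of_le d (pre.length : Int) _ h1 (by omega)]
    · rw [if_neg hb]
      by_cases hk : PySem.Set.contains ks t = true
      · rw [if_pos hk]
        by_cases hv : pvHasVal rest = true
        · rw [if_pos hv]
          have hstep : stripB_step (pre ++ t :: rest) ks d ((pre.length : Int), t)
              = d ++ [(pre.length : Int), (pre.length : Int) + 1] := by
            have hc1 : PySem.Set.contains (d ++ [(pre.length : Int)]) ((pre.length : Int) + 1) = false :=
              contains_false_of_le _ (pre.length : Int) _
                (by intro j hj; rcases List.mem_append.mp hj with h | h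
                    · exact h1 j h
                    · simp at h; omega) (by omega)
            simp only [stripB_step, hb, hk, stripB_cond, hv, if_true, Bool.false_eq_true, if_false,
              PySem.Set.add, hc1]
            simp
          rw [hstep]
          have := ih (pre ++ [t]) (d ++ [(pre.length : Int), (pre.length : Int) + 1])
            (by intro j hj; rcases List.mem_append.mp hj with h | h
                · have := h1 j h; omega
                · simp at h; omega)
          rw [hre, hlen] at this
          rw [this]
          have hc : PySem.Set.contains (d ++ [(pre.length : Int), (pre.length : Int) + 1]) ((pre.length : Int) + 1) = true := by
            rw [PySem.Set.contains_iff]; simp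
          rw [hc]; simp
        · rw [if_neg hv]
          have hstep : stripB_step (pre ++ t :: rest) ks d ((pre.length : Int), t)
              = d ++ [(pre.length : Int)] := by
            simp only [stripB_step, hb, hk, stripB_cond, hv, if_true, Bool.false_eq_true, if_false,
              PySem.Set.add]
          rw [hstep]
          have := ih (pre ++ [t]) (d ++ [(pre.length : Int)])
            (by intro j hj; rcases List.mem_append.mp hj with h | h
                · have := h1 j h; omega
                · simp at h; omega)
          rw [hre, hlen] at this
          rw [this]
          have hc : PySem.Set.contains (d ++ [(pre.length : Int)]) ((pre.length : Int) + 1) = false := by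
            apply contains_false_of_le
            · intro j hj; rcases List.mem_append.mp hj with h | h
              · exact h1 j h
              · simp at h; omega
            · omega
          rw [hc]; simp
      · rw [if_neg hk]
        have hstep : stripB_step (pre ++ t :: rest) ks d ((pre.length : Int), t) = d := by
          simp only [stripB_step, hb, hk, Bool.false_eq_true, if_false]
        rw [hstep]
        have := ih (pre ++ [t]) d (by intro j hj; have := h1 j hj; omega)
        rw [hre, hlen] at this
        rw [this, contains_false_of_le d (pre.length : Int) _ h1 (by omega)]

theorem filterB_eq_specGo (ks : PySem.Set String) (D : List Int) :
    ∀ (suf : List String) (i : Int) (b : Bool),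
      (∀ j : Int, i ≤ j → (PySem.Set.contains D j = true ↔ (j ∈ markGo ks i b suf ∨ (b = true ∧ j = i)))) →
      (PySem.List.enumerate suf i).filterMap
          (fun p => if PySem.Set.contains D p.1 then none else some p.2)
        = if b then specGo ks suf.tail else specGo ks suf := by
  intro suf
  induction suf with
  | nil =>
    intro i b hD
    cases b <;> simp [PySem.List.enumerate, specGo]
  | cons t rest ih =>
    intro i b hD
    rw [PySem.List.enumerate_cons, List.filterMap_cons]
    cases b with
    | true =>
      have hci : PySem.Set.contains D i = true := by
        rw [hD i (le_refl i)]; right; exact ⟨rfl, rfl⟩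
      have hrec := ih (i + 1) false (by
        intro j hj
        rw [hD j (by omega), markGo]
        have hji : ¬ j = i := by omega
        simp [hji])
      have hmi : i ∈ D := (PySem.Set.contains_iff D i).mp hci
      simp only [Bool.false_eq_true, if_false] at hrec
      simp [hmi]
      simpa using hrec
    | false =>
      rw [markGo] at hD
      simp only [Bool.false_eq_true, if_false] at hD ⊢
      by_cases hk : PySem.Set.contains ks t = true
      · by_cases hv : pvHasVal rest = true
        · simp only [hk, hv, if_true] at hD
          have hci : PySem.Set.contains D i = true := by
            rw [hD i (le_refl i)]; left; simp
          have hrec := ih (i + 1) true (by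
            intro j hj
            rw [hD j (by omega)]
            have hji : ¬ j = i := by omega
            simp [hji, List.mem_cons]
            tauto)
          have hmi : i ∈ D := (PySem.Set.contains_iff D i).mp hci
          have hmk : t ∈ ks := (PySem.Set.contains_iff ks t).mp hk
          simp only [if_true] at hrec
          simp [hmi, specGo, hmk, hv]
          simpa using hrec
        · simp only [hk, hv, if_true, Bool.false_eq_true, if_false] at hD
          have hci : PySem.Set.contains D i = true := by
            rw [hD i (le_refl i)]; left; simp
          have hrec := ih (i + 1) false (by
            intro j hj
            rw [hD j (by omega)]
            have hji : ¬ j = i := by omega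
            simp [hji, List.mem_cons])
          have hmi : i ∈ D := (PySem.Set.contains_iff D i).mp hci
          have hmk : t ∈ ks := (PySem.Set.contains_iff ks t).mp hk
          simp only [Bool.false_eq_true, if_false] at hrec
          simp [hmi, specGo, hmk, hv]
          simpa using hrec
      · simp only [hk, Bool.false_eq_true, if_false] at hD
        have hci : PySem.Set.contains D i = false := by
          rw [Bool.eq_false_iff]
          intro hc
          rcases (hD i (le_refl i)).mp hc with h | h
          · have := markGo_ge ks rest (i + 1) false i h; omega
          · simp at h
        have hrec := ih (i + 1) false (by
          intro j hj
          rw [hD j (by omega)]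
          simp)
        have hmi : i ∉ D := by
          intro hm
          rw [← PySem.Set.contains_iff D i] at hm
          rw [hm] at hci; cases hci
        have hmk : t ∉ ks := by
          intro hm; rw [← PySem.Set.contains_iff ks t] at hm; rw [hm] at hk; cases hk rfl
        simp only [Bool.false_eq_true, if_false] at hrec
        simp [hmi, specGo, hmk]
        simpa using hrec

-- ===== VERDICT (by name: the statement is the Claim_ definition above) =====
theorem strip_param_tokens_spec : Claim_equal_strip_param_tokens := by
  intro tokens keys _
  unfold Spec_strip_param_tokens

  simp only [strip_param_tokens, strip_param_tokens_alt]
  have hA := stripA_go_aux (PySem.Set.ofList keys) tokens tokens.length 0 [] (by omega)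
  simp only [List.drop_zero, List.nil_append] at hA
  rw [hA]
  have hfold := foldB_eq_markGo (PySem.Set.ofList keys) tokens [] PySem.Set.empty (by intro j hj; cases hj)
  simp only [List.length_nil, Nat.cast_zero] at hfold
  rw [List.nil_append] at hfold
  simp only [hfold]
  rw [show (PySem.Set.empty : List Int) ++ markGo (PySem.Set.ofList keys) 0 (PySem.Set.contains (PySem.Set.empty : List Int) 0) tokens
        = markGo (PySem.Set.ofList keys) 0 false tokens from rfl]
  have hD := filterB_eq_specGo (PySem.Set.ofList keys)
      (markGo (PySem.Set.ofList keys) 0 false tokens) tokens 0 false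
      (by intro j hj
          rw [PySem.Set.contains_iff]
          simp)
  simp only [Bool.false_eq_true, if_false] at hD
  rw [hD]
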